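-- pv_equiv track=rewrite | github.com/xwdqy/NagaAgent | mcpserver/agent_open_launcher/comprehensive_app_scanner.py | _merge_and_deduplicate
-- ===== SOURCE A (Python) =====
-- from typing import List, Dict, Optional  # 类型 #
--
-- def _merge_and_deduplicate(apps: List[Dict]) -> List[Dict]:
--     """合并和去重应用列表，优先选择快捷方式 #"""
--     unique_apps = {}
--
--     for app in apps:
--         name = app["name"]
--
--         # 如果应用不存在，直接添加
--         if name not in unique_apps:
--             unique_apps[name] = app
--         else:
--             # 如果已存在，优先选择快捷方式
--             existing_app = unique_apps[name]
--             if app["source"] == "shortcut" and existing_app["source"] == "registry":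
--                 unique_apps[name] = app
--
--     # 转换为列表并排序
--     result = list(unique_apps.values())
--     result.sort(key=lambda x: x["name"].lower())
--
--     return result
-- ===== SOURCE B (Python) =====
-- def _select(group):
--     first = group[0]
--     if first.get("source") == "registry":
--         return next((a for a in group if a.get("source") == "shortcut"), first)
--     return first
--
-- def _merge_and_deduplicate(apps):
--     groups = {}
--     for app in apps:
--         groups.setdefault(app["name"], []).append(app)
--     result = [_select(g) for g in groups.values()]
--     result.sort(key=lambda x: x["name"].lower())
--     return result
-- ===== Notes on version B (the rewrite author's own statement) =====
-- stated objective: alternative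
-- what changed: A deduplicates with a single conditional-replace scan over a name-keyed dict; B instead builds a name->group multimap in one pass and then runs a separate selection pass picking each group's first element, or its first shortcut when the first element came from the registry, before the same stable sort.
import Mathlib
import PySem

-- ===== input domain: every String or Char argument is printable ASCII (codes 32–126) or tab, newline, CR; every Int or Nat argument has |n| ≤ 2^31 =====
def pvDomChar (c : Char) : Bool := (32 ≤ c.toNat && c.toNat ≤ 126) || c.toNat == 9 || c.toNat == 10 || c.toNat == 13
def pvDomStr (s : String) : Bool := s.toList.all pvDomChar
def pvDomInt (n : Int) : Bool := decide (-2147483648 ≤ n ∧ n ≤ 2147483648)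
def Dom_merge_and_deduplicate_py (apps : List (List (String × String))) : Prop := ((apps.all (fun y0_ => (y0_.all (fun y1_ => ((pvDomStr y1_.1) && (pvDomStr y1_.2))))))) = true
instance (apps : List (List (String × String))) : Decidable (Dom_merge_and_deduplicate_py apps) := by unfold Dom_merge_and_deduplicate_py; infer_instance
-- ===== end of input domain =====

-- One line: B groups apps by name in one pass, then selects each group's winner in a
-- separate pass (first element, or the first shortcut when the first element is from the
-- registry) — a different decomposition of A's conditional-replace scan; objective: alternative.

-- app["name"] (inside Pre_ the key is present; getD's default is never used there)
def pvName (a : List (String × String)) : String := ((PySem.Dict.mk a).get? "name").getD ""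
-- app.get("source") / app["source"] as an Option
def pvSrc (a : List (String × String)) : Option String := (PySem.Dict.mk a).get? "source"
-- sort key x["name"].lower()
def pvKey (x : List (String × String)) : String := PySem.Str.lower (pvName x)

-- ===== PORT A =====
def merge_and_deduplicate_py (apps : List (List (String × String))) : List (List (String × String)) :=
  PySem.List.sorted
    (apps.foldl
      (fun (u : PySem.Dict String (List (String × String))) app =>
        let name := pvName app
        if u.contains name = false then
          u.insert name app
        else
          let existing := (u.get? name).getD []
          if (pvSrc app == some "shortcut") && (pvSrc existing == some "registry") then
            u.insert name app
          else u)
      PySem.Dict.empty).values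
    pvKey false

-- ===== PORT B =====
-- _select: group[0], or the first shortcut in the group when group[0] comes from the registry
def pvSelect (group : List (List (String × String))) : List (String × String) :=
  let first := group.headD []
  if pvSrc first == some "registry" then
    match group.find? (fun a => pvSrc a == some "shortcut") with
    | some a => a
    | none => first
  else first

def merge_and_deduplicate_py_alt (apps : List (List (String × String))) : List (List (String × String)) :=
  PySem.List.sorted
    ((apps.foldl
        (fun (g : PySem.Dict String (List (List (String × String)))) app =>
          g.modify (pvName app) [] (· ++ [app]))
        PySem.Dict.empty).values.map pvSelect)
    pvKey false

-- ===== PRECONDITION & SPEC =====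
-- Pre_ excludes exactly the inputs on which the Python A raises KeyError: an app without a
-- "name" key; a non-first app of its name without a "source" key; and a first app of its
-- name without "source" that is later followed by a same-named shortcut (whose comparison
-- reads the stored app's "source").
def Pre_merge_and_deduplicate_py (apps : List (List (String × String))) : Prop :=
  (apps.zipIdx.all (fun p =>
    let d := PySem.Dict.mk p.1
    d.contains "name" &&
    (if (apps.take p.2).any (fun b => (PySem.Dict.mk b).get? "name" == d.get? "name") then
      d.contains "source"
    else
      d.contains "source" ||
        !((apps.drop (p.2 + 1)).any (fun b =>
            ((PySem.Dict.mk b).get? "name" == d.get? "name") &&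
            ((PySem.Dict.mk b).get? "source" == some "shortcut"))))) ) = true
instance (apps : List (List (String × String))) : Decidable (Pre_merge_and_deduplicate_py apps) := by
  unfold Pre_merge_and_deduplicate_py; infer_instance

def pvWitness_merge_and_deduplicate_py : (List (List (String × String))) :=
  [[("name", "App"), ("source", "registry")], [("name", "App"), ("source", "shortcut")]]

def Spec_merge_and_deduplicate_py (apps : List (List (String × String))) (out : List (List (String × String))) : Prop := out = merge_and_deduplicate_py_alt apps
instance (apps : List (List (String × String))) (out : List (List (String × String))) : Decidable (Spec_merge_and_deduplicate_py apps out) := by unfold Spec_merge_and_deduplicate_py; infer_instance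

-- ===== CLAIM (what is proved, stated in full; the proofs are below) =====
def Claim_equal_merge_and_deduplicate_py : Prop := ∀ (apps : List (List (String × String))), Dom_merge_and_deduplicate_py apps → Pre_merge_and_deduplicate_py apps → Spec_merge_and_deduplicate_py apps (merge_and_deduplicate_py apps)

-- ===== LEMMAS AND PROOFS =====

-- map pvSelect over the values of a grouping dict
def pvMapSel (g : PySem.Dict String (List (List (String × String)))) : PySem.Dict String (List (String × String)) :=
  PySem.Dict.mk (g.items.map (fun p => (p.1, pvSelect p.2)))

theorem contains_pvMapSel (g : PySem.Dict String (List (List (String × String)))) (k : String) :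
    (pvMapSel g).contains k = g.contains k := by
  simp only [pvMapSel, PySem.Dict.contains, List.any_map]
  rfl

theorem get?_pvMapSel (g : PySem.Dict String (List (List (String × String)))) (k : String) :
    (pvMapSel g).get? k = (g.get? k).map pvSelect := by
  simp only [pvMapSel, PySem.Dict.get?, List.find?_map, Option.map_map]
  rfl

theorem pvMapSel_insert (g : PySem.Dict String (List (List (String × String)))) (k : String)
    (v : List (List (String × String))) :
    pvMapSel (g.insert k v) = (pvMapSel g).insert k (pvSelect v) := by
  apply PySem.Dict.ext
  have hL : (pvMapSel (g.insert k v)).items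
      = (g.insert k v).items.map (fun p => (p.1, pvSelect p.2)) := rfl
  rw [hL, PySem.Dict.items_insert, PySem.Dict.items_insert, contains_pvMapSel]
  by_cases h : g.contains k = true
  · simp only [h, if_pos]
    have hM : (pvMapSel g).items = g.items.map (fun p => (p.1, pvSelect p.2)) := rfl
    rw [hM, List.map_map, List.map_map]
    apply List.map_congr_left
    intro p _
    by_cases hp : (p.1 == k) = true <;> simp [hp, Function.comp]
  · have hcf : g.contains k = false := by simpa using h
    simp only [hcf, Bool.false_eq_true, if_false, List.map_append]
    rfl

theorem pvSelect_single (a : List (String × String)) : pvSelect [a] = a := by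
  by_cases h : (pvSrc a == some "registry") = true
  · have ha : pvSrc a = some "registry" := by simpa using h
    simp [pvSelect, List.find?, ha]
  · simp [pvSelect, h]

theorem pvSelect_snoc (g : List (List (String × String))) (b : List (String × String))
    (h : g ≠ []) :
    pvSelect (g ++ [b]) =
      (if (pvSrc b == some "shortcut") && (pvSrc (pvSelect g) == some "registry") then b
       else pvSelect g) := by
  obtain ⟨a, t, rfl⟩ : ∃ a t, g = a :: t := by
    cases g with
    | nil => exact absurd rfl h
    | cons a t => exact ⟨a, t, rfl⟩
  by_cases h1 : (pvSrc a == some "registry") = true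
  · have e1 : pvSelect (a :: t)
        = (match (a :: t).find? (fun x => pvSrc x == some "shortcut") with
           | some s => s
           | none => a) := by
      simp [pvSelect, h1]
    have e2 : pvSelect ((a :: t) ++ [b])
        = (match ((a :: t) ++ [b]).find? (fun x => pvSrc x == some "shortcut") with
           | some s => s
           | none => a) := by
      simp [pvSelect, h1]
    rw [e1, e2, List.find?_append]
    cases hf : (a :: t).find? (fun x => pvSrc x == some "shortcut") with
    | some s =>
      have hs := List.find?_some hf
      have hsr : pvSrc s = some "shortcut" := by simpa using hs
      simp [Option.or, hsr]
    | none =>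
      by_cases hb : (pvSrc b == some "shortcut") = true
      · simp [Option.or, List.find?, hb, h1]
      · simp [Option.or, List.find?, hb, h1]
  · have e1 : pvSelect (a :: t) = a := by simp [pvSelect, h1]
    have e2 : pvSelect ((a :: t) ++ [b]) = a := by simp [pvSelect, h1]
    rw [e1, e2, if_neg (by simp [h1])]

theorem mem_values_of_get? (g : PySem.Dict String (List (List (String × String)))) (k : String)
    (v : List (List (String × String))) (h : g.get? k = some v) : v ∈ g.values := by
  simp only [PySem.Dict.get?, Option.map_eq_some_iff] at h
  obtain ⟨p, hp, rfl⟩ := h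
  exact List.mem_map_of_mem (List.mem_of_find?_eq_some hp)

-- inserting back the value already stored at a key changes nothing (unique keys)
theorem insert_self_eq (d : PySem.Dict String (List (String × String))) (k : String)
    (v : List (String × String)) (hnd : d.keys.Nodup) (h : d.get? k = some v) :
    d.insert k v = d := by
  have hmem : (k, v) ∈ d.items := PySem.Dict.mem_items_of_get?_eq_some d h
  have hc : d.contains k = true := by
    simp only [PySem.Dict.contains, List.any_eq_true]
    exact ⟨(k, v), hmem, by simp⟩
  apply PySem.Dict.ext
  rw [PySem.Dict.items_insert_of_contains d v hc]
  have hnd' : (d.items.map (fun x => x.1)).Nodup := hnd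
  have hinj := List.inj_on_of_nodup_map hnd'
  calc d.items.map (fun p => if (p.1 == k) = true then (k, v) else p)
      = d.items.map id := by
        apply List.map_congr_left
        intro p hp
        by_cases hpk : (p.1 == k) = true
        · have hk : p.1 = k := by simpa using hpk
          have hpe : p = (k, v) := hinj hp hmem (by simpa using hk)
          simp [hpe]
        · simp [hpk]
    _ = d.items := List.map_id _

theorem keys_nodup_modify (g : PySem.Dict String (List (List (String × String)))) (k : String)
    (f : List (List (String × String)) → List (List (String × String)))
    (h : g.keys.Nodup) : (g.modify k [] f).keys.Nodup := by
  simp only [PySem.Dict.modify]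
  by_cases hc : g.contains k = true
  · rw [PySem.Dict.keys_insert_of_contains _ _ hc]
    exact h
  · have hc' : g.contains k = false := by simpa using hc
    rw [PySem.Dict.keys_insert_of_not_contains _ _ hc']
    have hk : k ∉ g.keys := by
      intro hmem
      rw [PySem.Dict.contains_iff_mem_keys] at hc
      exact hc hmem
    refine List.Nodup.append h (List.nodup_singleton k) ?_
    intro a ha hb
    simp only [List.mem_singleton] at hb
    subst hb
    exact hk ha

theorem values_nonempty_modify (g : PySem.Dict String (List (List (String × String)))) (k : String)
    (app : List (String × String))
    (h : ∀ v ∈ g.values, v ≠ []) :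
    ∀ v ∈ (g.modify k [] (· ++ [app])).values, v ≠ [] := by
  intro v hv
  simp only [PySem.Dict.modify] at hv
  rcases PySem.Dict.mem_values_insert _ _ _ _ hv with h1 | h1
  · subst h1; simp
  · exact h v h1

-- one loop step of A applied to pvMapSel g equals pvMapSel of one loop step of B
theorem step_eq (g : PySem.Dict String (List (List (String × String))))
    (hnd : g.keys.Nodup) (hne : ∀ v ∈ g.values, v ≠ []) (app : List (String × String)) :
    (if (pvMapSel g).contains (pvName app) = false then
       (pvMapSel g).insert (pvName app) app
     else if (pvSrc app == some "shortcut")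
            && (pvSrc (((pvMapSel g).get? (pvName app)).getD []) == some "registry") then
       (pvMapSel g).insert (pvName app) app
     else pvMapSel g)
    = pvMapSel (g.modify (pvName app) [] (· ++ [app])) := by
  simp only [PySem.Dict.modify]
  rw [pvMapSel_insert, contains_pvMapSel, get?_pvMapSel]
  by_cases hc : g.contains (pvName app) = true
  · rw [hc, if_neg (by simp)]
    cases hg : g.get? (pvName app) with
    | none =>
      exfalso
      have hcf := (PySem.Dict.get?_eq_none_iff_contains g (pvName app)).mp hg
      rw [hc] at hcf
      exact Bool.noConfusion hcf
    | some gr =>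
      have hgr : gr ≠ [] := hne gr (mem_values_of_get? g _ gr hg)
      have hget : g.getD (pvName app) [] = gr := by simp [PySem.Dict.getD, hg]
      rw [hget, pvSelect_snoc gr app hgr]
      simp only [Option.map_some, Option.getD_some]
      by_cases hcond : ((pvSrc app == some "shortcut") && (pvSrc (pvSelect gr) == some "registry")) = true
      · rw [if_pos hcond, if_pos hcond]
      · rw [if_neg hcond, if_neg hcond]
        exact (insert_self_eq (pvMapSel g) (pvName app) (pvSelect gr)
          (by simpa [pvMapSel, PySem.Dict.keys, List.map_map, Function.comp] using hnd)
          (by rw [get?_pvMapSel, hg]; rfl)).symm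
  · have hc' : g.contains (pvName app) = false := by simpa using hc
    have hget : g.getD (pvName app) [] = [] :=
      PySem.Dict.getD_of_not_contains g [] hc'
    rw [hget, hc', if_pos rfl, List.nil_append, pvSelect_single]

theorem fold_eq (apps : List (List (String × String)))
    (g : PySem.Dict String (List (List (String × String))))
    (hnd : g.keys.Nodup) (hne : ∀ v ∈ g.values, v ≠ []) :
    apps.foldl
      (fun (u : PySem.Dict String (List (String × String))) app =>
        let name := pvName app
        if u.contains name = false then
          u.insert name app
        else
          let existing := (u.get? name).getD []
          if (pvSrc app == some "shortcut") && (pvSrc existing == some "registry") then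
            u.insert name app
          else u)
      (pvMapSel g)
    = pvMapSel (apps.foldl
        (fun (g : PySem.Dict String (List (List (String × String)))) app =>
          g.modify (pvName app) [] (· ++ [app])) g) := by
  induction apps generalizing g with
  | nil => rfl
  | cons a rest ih =>
    simp only [List.foldl_cons]
    rw [step_eq g hnd hne a]
    exact ih _ (keys_nodup_modify g (pvName a) _ hnd) (values_nonempty_modify g (pvName a) a hne)

theorem values_pvMapSel (g : PySem.Dict String (List (List (String × String)))) :
    (pvMapSel g).values = g.values.map pvSelect := by
  simp only [pvMapSel, PySem.Dict.values, List.map_map]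
  rfl

-- ===== VERDICT (by name: the statement is the Claim_ definition above) =====
theorem merge_and_deduplicate_py_spec : Claim_equal_merge_and_deduplicate_py := by
  intro apps _ _
  unfold Spec_merge_and_deduplicate_py merge_and_deduplicate_py merge_and_deduplicate_py_alt
  have h0 : (PySem.Dict.empty : PySem.Dict String (List (List (String × String)))).keys.Nodup := by
    simp [PySem.Dict.empty, PySem.Dict.keys]
  have h1 : ∀ v ∈ (PySem.Dict.empty : PySem.Dict String (List (List (String × String)))).values, v ≠ [] := by
    simp [PySem.Dict.empty, PySem.Dict.values]
  have h2 : (PySem.Dict.empty : PySem.Dict String (List (String × String)))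
      = pvMapSel PySem.Dict.empty := rfl
  rw [h2, fold_eq apps PySem.Dict.empty h0 h1, values_pvMapSel]
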